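-- pv_equiv track=rewrite | github.com/beardbusters/cse150chat | p2-kemuyoun-fhornsan-client.py | parse_message
-- ===== SOURCE A (Python) =====
-- CRLF = "\r\n"
--
-- def parse_message(raw: str):
--     parts = raw.split(CRLF + CRLF, 1) #splits the header from the pody
--     header_part = parts[0]
--     body = parts[1] if len(parts) > 1 else "" #if parts is 1, then there is no body
--
--     lines = header_part.split(CRLF) #splits up the lines between the CRLF
--     first_line = lines[0].strip() if lines else "" #gets the protocol message
--     headers = {}
--
--     for line in lines[1:]: #gets the values from each header
--         if ":" in line:
--             key, value = line.split(":", 1)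
--             headers[key.strip()] = value.strip()
--
--     return first_line, headers, body
-- ===== SOURCE B (Python) =====
-- CRLF = "\r\n"
--
-- def _take_line(s):
--     # consume one line from the front of the buffer
--     i = s.find(CRLF)
--     if i < 0:
--         return s, ""
--     return s[:i], s[i + 2:]
--
-- def parse_message(raw: str):
--     # Cursor scanner: consume the raw string line by line from the front with
--     # str.find, never materializing a line list and never pre-splitting the
--     # header from the body; the blank separator line shows up as the remaining
--     # buffer starting with CRLF, and whatever follows it is the body verbatim.
--     line, s = _take_line(raw)
--     first_line = line.strip()
--     headers = {}
--     body = ""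
--     while s != "":
--         if s.startswith(CRLF):
--             body = s[2:]
--             break
--         line, s = _take_line(s)
--         if ":" in line:
--             key, value = line.split(":", 1)
--             headers[key.strip()] = value.strip()
--     return first_line, headers, body
-- ===== Notes on version B (the rewrite author's own statement) =====
-- stated objective: alternative
-- what changed: B is a cursor scanner that consumes the raw string line by line from the front with str.find and slicing, detecting the header/body separator as the remaining buffer starting with CRLF, instead of A's staged structure that first splits the raw string on CRLF+CRLF into header/body and then splits the header part into a list of lines to iterate over.
import Mathlib
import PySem

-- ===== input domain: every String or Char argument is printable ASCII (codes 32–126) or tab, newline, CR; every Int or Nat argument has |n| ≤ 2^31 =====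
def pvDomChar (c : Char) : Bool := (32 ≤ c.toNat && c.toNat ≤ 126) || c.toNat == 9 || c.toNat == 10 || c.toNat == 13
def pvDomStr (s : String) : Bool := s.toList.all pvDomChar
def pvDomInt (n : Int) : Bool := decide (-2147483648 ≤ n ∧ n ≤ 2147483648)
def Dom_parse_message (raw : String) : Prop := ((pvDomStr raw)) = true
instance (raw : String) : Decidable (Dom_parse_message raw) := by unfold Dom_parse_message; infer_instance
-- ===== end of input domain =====

-- B is a cursor scanner consuming the raw string line by line from the front (str.find + slices),
-- detecting the header/body separator as the remaining buffer starting with CRLF, instead of A's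
-- staged split on CRLF+CRLF followed by a split of the header part into a line list (objective: alternative).

-- ===== PORT A =====
-- shared helper: the header-line handler, identical lines in both Pythons:
-- 'if ":" in line: key, value = line.split(":", 1); headers[key.strip()] = value.strip()'
def pvAddHeader (h : PySem.Dict String String) (line : List Char) : PySem.Dict String String :=
  if PySem.Chars.isIn [':'] line then
    match PySem.Chars.splitOnMax line [':'] 1 with
    | [key, value] =>
        h.insert (String.ofList (PySem.Chars.strip key)) (String.ofList (PySem.Chars.strip value))
    | _ => h   -- unreachable: split(":", 1) under ':' ∈ line yields exactly two pieces
  else h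

def parse_message (raw : String) : String × (List (String × String)) × String :=
  -- parts = raw.split(CRLF + CRLF, 1)
  let parts := PySem.Chars.splitOnMax raw.toList ['\r', '\n', '\r', '\n'] 1
  -- header_part = parts[0]  (parts is never empty, the default is dead)
  let header_part := (PySem.List.pyGet? parts 0).getD []
  -- body = parts[1] if len(parts) > 1 else ""
  let body := if 1 < parts.length then (PySem.List.pyGet? parts 1).getD [] else []
  -- lines = header_part.split(CRLF)
  let lines := PySem.Chars.splitOn header_part ['\r', '\n']
  -- first_line = lines[0].strip() if lines else ""
  let first_line := if lines ≠ [] then PySem.Chars.strip ((PySem.List.pyGet? lines 0).getD []) else []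
  -- for line in lines[1:]: …
  let headers := (lines.drop 1).foldl pvAddHeader ⟨[]⟩
  (String.ofList first_line, headers.items, String.ofList body)

-- ===== PORT B =====
-- def _take_line(s): i = s.find(CRLF); return (s, "") if i < 0 else (s[:i], s[i+2:])
def pvTakeLine (s : List Char) : List Char × List Char :=
  let i := PySem.Chars.find s ['\r', '\n']
  if i < 0 then (s, [])
  else (PySem.List.slice s none (some i), PySem.List.slice s (some (i + 2)) none)

-- termination fact for the while loop below (cited in its decreasing_by)
theorem pvTakeLine_rest_lt (s : List Char) (h : ¬ s = []) : (pvTakeLine s).2.length < s.length := by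
  have hlen : 0 < s.length := List.length_pos_iff.mpr h
  unfold pvTakeLine
  by_cases hneg : PySem.Chars.find s ['\r', '\n'] < 0
  · simp [hneg, hlen]
  · have h0 : (0 : Int) ≤ PySem.Chars.find s ['\r', '\n'] := by omega
    simp only [hneg, if_false]
    rw [PySem.List.slice_from s (by omega)]
    simp only [List.length_drop]
    have : 2 ≤ (PySem.Chars.find s ['\r', '\n'] + 2).toNat := by omega
    omega

-- the Python while loop 'while s != "": …' of B, as a recursion on the shrinking buffer
def pvParseHeaders (s : List Char) (headers : PySem.Dict String String) :
    PySem.Dict String String × List Char :=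
  if hnil : s = [] then (headers, [])
  else if PySem.Chars.startswith s ['\r', '\n'] then (headers, PySem.List.slice s (some 2) none)
  else
    let lr := pvTakeLine s
    pvParseHeaders lr.2 (pvAddHeader headers lr.1)
termination_by s.length
decreasing_by exact pvTakeLine_rest_lt s hnil

def parse_message_alt (raw : String) : String × (List (String × String)) × String :=
  -- line, s = _take_line(raw)
  let lr := pvTakeLine raw.toList
  -- first_line = line.strip()
  let first_line := PySem.Chars.strip lr.1
  -- the while loop, with headers = {} and body = ""
  let hb := pvParseHeaders lr.2 ⟨[]⟩
  (String.ofList first_line, hb.1.items, String.ofList hb.2)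

-- ===== PRECONDITION & SPEC =====
def Spec_parse_message (raw : String) (out : String × (List (String × String)) × String) : Prop := out = parse_message_alt raw
instance (raw : String) (out : String × (List (String × String)) × String) : Decidable (Spec_parse_message raw out) := by unfold Spec_parse_message; infer_instance

-- ===== CLAIM (what is proved, stated in full; the proofs are below) =====
def Claim_equal_parse_message : Prop := ∀ (raw : String), Dom_parse_message raw → Spec_parse_message raw (parse_message raw)

-- ===== LEMMAS AND PROOFS =====

-- prepend a char to the first piece (the generic-cons step of a split)
def pvChd (c : Char) : List (List Char) → List (List Char)
  | [] => [[c]]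
  | p :: ps => (c :: p) :: ps

-- structural form of s.split("\r\n")
def pvSp : List Char → List (List Char)
  | [] => [[]]
  | '\r' :: '\n' :: rest => [] :: pvSp rest
  | c :: rest => pvChd c (pvSp rest)

-- first occurrence of "\r\n\r\n": some (before, after) or none
def pvBrk : List Char → Option (List Char × List Char)
  | '\r' :: '\n' :: '\r' :: '\n' :: rest => some ([], rest)
  | c :: rest =>
      (match pvBrk rest with
       | some (p, q) => some (c :: p, q)
       | none => none)
  | [] => none

-- first occurrence of "\r\n": some (before, after) or none
def pvTL : List Char → Option (List Char × List Char)
  | '\r' :: '\n' :: rest => some ([], rest)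
  | c :: rest =>
      (match pvTL rest with
       | some (p, q) => some (c :: p, q)
       | none => none)
  | [] => none

-- apply a function to the first piece only
def pvMh (f : List Char → List Char) : List (List Char) → List (List Char)
  | [] => []
  | p :: ps => f p :: ps

theorem pvSp_eq3 {c : Char} {rest : List Char}
    (h : ∀ (r : List Char), c = '\r' → rest = '\n' :: r → False) :
    pvSp (c :: rest) = pvChd c (pvSp rest) := by
  rw [pvSp]; exact h

theorem pvBrk_eq2 {c : Char} {rest : List Char}
    (h : ∀ (r : List Char), c = '\r' → rest = '\n' :: '\r' :: '\n' :: r → False) :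
    pvBrk (c :: rest) =
      match pvBrk rest with
      | some (p, q) => some (c :: p, q)
      | none => none := by
  rw [pvBrk]; exact h

theorem pvTL_eq2 {c : Char} {rest : List Char}
    (h : ∀ (r : List Char), c = '\r' → rest = '\n' :: r → False) :
    pvTL (c :: rest) =
      match pvTL rest with
      | some (p, q) => some (c :: p, q)
      | none => none := by
  rw [pvTL]; exact h

theorem pvSp_ne_nil (l : List Char) : pvSp l ≠ [] := by
  induction l using pvSp.induct with
  | case1 => simp [pvSp]
  | case2 rest ih => simp [pvSp]
  | case3 c rest h ih =>
    rw [pvSp_eq3 h]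
    cases h' : pvSp rest <;> simp [pvChd]

theorem pvChd_append {c : Char} {ys : List (List Char)} (zs : List (List Char)) (h : ys ≠ []) :
    pvChd c (ys ++ zs) = pvChd c ys ++ zs := by
  cases ys with
  | nil => exact absurd rfl h
  | cons p ps => simp [pvChd]

theorem pvPref2 {c : Char} {rest : List Char}
    (h : ['\r', '\n'].isPrefixOf (c :: rest) = true) :
    c = '\r' ∧ ∃ r, rest = '\n' :: r := by
  cases rest with
  | nil => simp [List.isPrefixOf] at h
  | cons d r =>
    simp [List.isPrefixOf] at h
    exact ⟨h.1.symm, r, by rw [← h.2]⟩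

theorem pvPref4 {c : Char} {rest : List Char}
    (h : ['\r', '\n', '\r', '\n'].isPrefixOf (c :: rest) = true) :
    c = '\r' ∧ ∃ r, rest = '\n' :: '\r' :: '\n' :: r := by
  match rest, h with
  | d :: e :: f :: r, h =>
    simp [List.isPrefixOf] at h
    exact ⟨h.1.symm, r, by rw [← h.2.1, ← h.2.2.1, ← h.2.2.2]⟩
  | [], h => simp [List.isPrefixOf] at h
  | [d], h => simp [List.isPrefixOf] at h
  | [d, e], h => simp [List.isPrefixOf] at h

theorem pvNotPref2 {c : Char} {rest : List Char}
    (h : ¬ (['\r', '\n'].isPrefixOf (c :: rest) = true)) :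
    ∀ (r : List Char), c = '\r' → rest = '\n' :: r → False := by
  intro r hc hr
  subst hc; subst hr
  simp [List.isPrefixOf] at h

theorem pvNotPref4 {c : Char} {rest : List Char}
    (h : ¬ (['\r', '\n', '\r', '\n'].isPrefixOf (c :: rest) = true)) :
    ∀ (r : List Char), c = '\r' → rest = '\n' :: '\r' :: '\n' :: r → False := by
  intro r hc hr
  subst hc; subst hr
  simp [List.isPrefixOf] at h

theorem pvGoEq (fuel : Nat) :
    ∀ (l cur : List Char) (acc : List (List Char)), l.length + 1 ≤ fuel →
      PySem.Chars.splitOn.go ['\r', '\n'] fuel l cur acc =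
        acc.reverse ++ pvMh (cur.reverse ++ ·) (pvSp l) := by
  induction fuel with
  | zero => intro l cur acc h; omega
  | succ fuel ih =>
    intro l cur acc h
    cases l with
    | nil =>
      rw [PySem.Chars.splitOn.go.eq_def]
      simp [pvSp, pvMh]
    | cons c rest =>
      have hstep : PySem.Chars.splitOn.go ['\r','\n'] (fuel+1) (c :: rest) cur acc =
          if ['\r','\n'].isPrefixOf (c :: rest) then
            PySem.Chars.splitOn.go ['\r','\n'] fuel (List.drop 2 (c :: rest)) [] (cur.reverse :: acc)
          else PySem.Chars.splitOn.go ['\r','\n'] fuel rest (c :: cur) acc := by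
        rw [PySem.Chars.splitOn.go.eq_def]; rfl
      rw [hstep]
      by_cases hp : ['\r','\n'].isPrefixOf (c :: rest) = true
      · rw [if_pos hp]
        obtain ⟨hc, r, hr⟩ := pvPref2 hp
        subst hc; subst hr
        rw [show List.drop 2 ('\r' :: '\n' :: r) = r from rfl]
        rw [ih r [] (cur.reverse :: acc) (by simp at h ⊢; omega)]
        have : pvSp ('\r' :: '\n' :: r) = [] :: pvSp r := by rw [pvSp]
        rw [this]
        cases hq : pvSp r <;> simp [pvMh]
      · rw [if_neg hp]
        rw [ih rest (c :: cur) acc (by simp at h ⊢; omega)]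
        rw [pvSp_eq3 (pvNotPref2 hp)]
        cases hq : pvSp rest with
        | nil => exact absurd hq (pvSp_ne_nil rest)
        | cons p ps => simp [pvMh, pvChd]

theorem pvSplitOn_eq (l : List Char) : PySem.Chars.splitOn l ['\r', '\n'] = pvSp l := by
  unfold PySem.Chars.splitOn
  rw [pvGoEq (l.length + 1) l [] [] (le_refl _)]
  cases h : pvSp l with
  | nil => exact absurd h (pvSp_ne_nil l)
  | cons p ps => simp [pvMh]

theorem pvGoM0 (fuel : Nat) (l cur : List Char) (acc : List (List Char)) :
    PySem.Chars.splitOnMax.go ['\r', '\n', '\r', '\n'] fuel 0 l cur acc =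
      acc.reverse ++ [cur.reverse ++ l] := by
  cases fuel with
  | zero => rw [PySem.Chars.splitOnMax.go.eq_def]; simp
  | succ fuel =>
    cases l with
    | nil => rw [PySem.Chars.splitOnMax.go.eq_def]; simp
    | cons c rest =>
      have hstep : PySem.Chars.splitOnMax.go ['\r','\n','\r','\n'] (fuel+1) 0 (c :: rest) cur acc =
          ((cur.reverse ++ (c :: rest)) :: acc).reverse := by
        rw [PySem.Chars.splitOnMax.go.eq_def]; rfl
      rw [hstep]; simp

theorem pvGoM1 (fuel : Nat) :
    ∀ (l cur : List Char) (acc : List (List Char)), l.length + 1 ≤ fuel →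
      PySem.Chars.splitOnMax.go ['\r', '\n', '\r', '\n'] fuel 1 l cur acc =
        acc.reverse ++
          (match pvBrk l with
           | some (p, q) => [cur.reverse ++ p, q]
           | none => [cur.reverse ++ l]) := by
  induction fuel with
  | zero => intro l cur acc h; omega
  | succ fuel ih =>
    intro l cur acc h
    cases l with
    | nil =>
      rw [PySem.Chars.splitOnMax.go.eq_def]
      simp [pvBrk]
    | cons c rest =>
      have hstep : PySem.Chars.splitOnMax.go ['\r','\n','\r','\n'] (fuel+1) 1 (c :: rest) cur acc =
          if ['\r','\n','\r','\n'].isPrefixOf (c :: rest) then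
            PySem.Chars.splitOnMax.go ['\r','\n','\r','\n'] fuel 0 (List.drop 4 (c :: rest)) [] (cur.reverse :: acc)
          else PySem.Chars.splitOnMax.go ['\r','\n','\r','\n'] fuel 1 rest (c :: cur) acc := by
        rw [PySem.Chars.splitOnMax.go.eq_def]; rfl
      rw [hstep]
      by_cases hp : ['\r','\n','\r','\n'].isPrefixOf (c :: rest) = true
      · rw [if_pos hp]
        obtain ⟨hc, r, hr⟩ := pvPref4 hp
        subst hc; subst hr
        rw [pvGoM0]
        have : pvBrk ('\r' :: '\n' :: '\r' :: '\n' :: r) = some ([], r) := by rw [pvBrk]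
        rw [this]
        simp
      · rw [if_neg hp]
        rw [ih rest (c :: cur) acc (by simp at h ⊢; omega)]
        rw [pvBrk_eq2 (pvNotPref4 hp)]
        cases hb : pvBrk rest with
        | none => simp
        | some pq => cases pq with | mk p q => simp

theorem pvSplitOnMax_eq (l : List Char) :
    PySem.Chars.splitOnMax l ['\r', '\n', '\r', '\n'] 1 =
      match pvBrk l with
      | some (p, q) => [p, q]
      | none => [l] := by
  unfold PySem.Chars.splitOnMax
  rw [if_neg (by norm_num)]
  rw [show Int.toNat 1 = 1 from rfl]
  rw [pvGoM1 (l.length + 1) l [] [] (by norm_num)]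
  cases hb : pvBrk l with
  | none => simp
  | some pq => cases pq with | mk p q => simp

theorem pvSp_append (a b : List Char) :
    pvSp (a ++ '\r' :: '\n' :: b) = pvSp a ++ pvSp b := by
  induction a using pvSp.induct with
  | case1 =>
    have : pvSp ('\r' :: '\n' :: b) = [] :: pvSp b := by rw [pvSp]
    simp [this, pvSp]
  | case2 rest ih =>
    have h1 : pvSp ('\r' :: '\n' :: (rest ++ '\r' :: '\n' :: b)) = [] :: pvSp (rest ++ '\r' :: '\n' :: b) := by
      rw [pvSp]
    have h2 : pvSp ('\r' :: '\n' :: rest) = [] :: pvSp rest := by rw [pvSp]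
    simp only [List.cons_append, h1, h2, ih]
  | case3 c rest h ih =>
    have hcond : ∀ (r : List Char), c = '\r' → rest ++ '\r' :: '\n' :: b = '\n' :: r → False := by
      intro r hc hr
      cases rest with
      | nil =>
        rw [List.nil_append] at hr
        injection hr with h1 _
        exact absurd h1 (by decide)
      | cons d t =>
        rw [List.cons_append] at hr
        injection hr with h1 _
        exact h t hc (by rw [h1])
    rw [List.cons_append, pvSp_eq3 hcond, ih, pvChd_append _ (pvSp_ne_nil rest), pvSp_eq3 h]

theorem pvJoin_sp (l : List Char) : PySem.Chars.join ['\r', '\n'] (pvSp l) = l := by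
  induction l using pvSp.induct with
  | case1 => simp [pvSp, PySem.Chars.join_singleton]
  | case2 rest ih =>
    have h2 : pvSp ('\r' :: '\n' :: rest) = [] :: pvSp rest := by rw [pvSp]
    rw [h2]
    cases hq : pvSp rest with
    | nil => exact absurd hq (pvSp_ne_nil rest)
    | cons p ps =>
      rw [PySem.Chars.join_cons_cons, ← hq, ih]
      simp
  | case3 c rest h ih =>
    rw [pvSp_eq3 h]
    cases hq : pvSp rest with
    | nil => exact absurd hq (pvSp_ne_nil rest)
    | cons p ps =>
      rw [hq] at ih
      cases ps with
      | nil =>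
        simp only [pvChd, PySem.Chars.join_singleton] at *
        rw [ih]
      | cons q ps' =>
        simp only [pvChd, PySem.Chars.join_cons_cons] at *
        rw [← ih]
        simp

-- ----- pvTL: decomposition / minimality / absence, and the bridge to Chars.find -----

theorem pvTL_decomp {l p q : List Char} (h : pvTL l = some (p, q)) :
    l = p ++ '\r' :: '\n' :: q := by
  induction l using pvTL.induct generalizing p q with
  | case1 rest =>
    rw [pvTL] at h
    injection h with h'
    injection h' with h1 h2
    subst h1; subst h2; rfl
  | case2 c rest hc p' q' hb ih =>
    rw [pvTL_eq2 hc, hb] at h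
    injection h with h'
    injection h' with h1 h2
    subst h2
    rw [← h1, List.cons_append]
    rw [ih hb]
  | case3 c rest hc hb ih =>
    rw [pvTL_eq2 hc, hb] at h
    simp at h
  | case4 => simp [pvTL] at h

theorem pvTL_min {l p q : List Char} (h : pvTL l = some (p, q)) :
    ∀ u v, l = u ++ '\r' :: '\n' :: v → p.length ≤ u.length := by
  induction l using pvTL.induct generalizing p q with
  | case1 rest =>
    rw [pvTL] at h
    injection h with h'
    injection h' with h1 _
    intro u v _
    rw [← h1]
    simp
  | case2 c rest hc p' q' hb ih =>
    rw [pvTL_eq2 hc, hb] at h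
    injection h with h'
    injection h' with h1 h2
    intro u v huv
    cases u with
    | nil =>
      rw [List.nil_append] at huv
      injection huv with e1 e2
      exact (hc v e1 e2).elim
    | cons d u' =>
      rw [List.cons_append] at huv
      injection huv with _ e2
      have := ih hb u' v e2
      rw [← h1]
      simp
      omega
  | case3 c rest hc hb ih =>
    rw [pvTL_eq2 hc, hb] at h
    simp at h
  | case4 => simp [pvTL] at h

theorem pvTL_none {l : List Char} (h : pvTL l = none) :
    ∀ u v, l ≠ u ++ '\r' :: '\n' :: v := by
  induction l using pvTL.induct with
  | case1 rest => rw [pvTL] at h; simp at h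
  | case2 c rest hc p q hb ih => rw [pvTL_eq2 hc, hb] at h; simp at h
  | case3 c rest hc hb ih =>
    intro u v huv
    cases u with
    | nil =>
      rw [List.nil_append] at huv
      injection huv with e1 e2
      exact hc v e1 e2
    | cons d u' =>
      rw [List.cons_append] at huv
      injection huv with _ e2
      exact ih hb u' v e2
  | case4 =>
    intro u v huv
    cases u <;> simp at huv

theorem pvSp_of_pvTL_none {l : List Char} (h : pvTL l = none) : pvSp l = [l] := by
  induction l using pvTL.induct with
  | case1 rest => rw [pvTL] at h; simp at h
  | case2 c rest hc p q hb ih => rw [pvTL_eq2 hc, hb] at h; simp at h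
  | case3 c rest hc hb ih =>
    rw [pvSp_eq3 hc, ih hb]
    rfl
  | case4 => rw [pvSp]

theorem pvTL_some_free {l p q : List Char} (h : pvTL l = some (p, q)) : pvTL p = none := by
  induction l using pvTL.induct generalizing p q with
  | case1 rest =>
    rw [pvTL] at h
    injection h with h'
    injection h' with h1 _
    rw [← h1]
    rfl
  | case2 c rest hc p' q' hb ih =>
    rw [pvTL_eq2 hc, hb] at h
    injection h with h'
    injection h' with h1 h2
    rw [← h1]
    have hcond : ∀ (r : List Char), c = '\r' → p' = '\n' :: r → False := by
      intro r hcc hpr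
      have hd := pvTL_decomp hb
      exact hc (r ++ '\r' :: '\n' :: q') hcc (by rw [hd, hpr]; simp)
    rw [pvTL_eq2 hcond, ih hb]
  | case3 c rest hc hb ih =>
    rw [pvTL_eq2 hc, hb] at h
    simp at h
  | case4 => simp [pvTL] at h

theorem pvSp_cons_of_some {l p q : List Char} (h : pvTL l = some (p, q)) :
    pvSp l = p :: pvSp q := by
  rw [pvTL_decomp h, pvSp_append, pvSp_of_pvTL_none (pvTL_some_free h)]
  rfl

theorem pvFind_of_none {s : List Char} (h : pvTL s = none) :
    PySem.Chars.find s ['\r', '\n'] = -1 := by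
  rw [PySem.Chars.find_eq_neg_one_iff]
  rintro ⟨u, v, huv⟩
  exact pvTL_none h u v (by rw [← huv]; simp)

theorem pvFind_of_some {s p q : List Char} (h : pvTL s = some (p, q)) :
    PySem.Chars.find s ['\r', '\n'] = (p.length : Int) := by
  have hd := pvTL_decomp h
  have hinf : ['\r', '\n'] <:+: s := ⟨p, q, by rw [hd]; simp⟩
  have hnn : 0 ≤ PySem.Chars.find s ['\r', '\n'] := (PySem.Chars.find_nonneg_iff s _).mpr hinf
  obtain ⟨hpre, hmin⟩ := PySem.Chars.find_spec hnn
  have hle := PySem.Chars.find_le_length s ['\r', '\n']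
  have h1 : ¬ p.length < (PySem.Chars.find s ['\r', '\n']).toNat := by
    intro hlt
    exact hmin p.length hlt ⟨q, by rw [hd]; simp⟩
  have h2 : ¬ (PySem.Chars.find s ['\r', '\n']).toNat < p.length := by
    intro hlt
    obtain ⟨v, hv⟩ := hpre
    have hs : s = s.take (PySem.Chars.find s ['\r', '\n']).toNat ++ '\r' :: '\n' :: v := by
      conv_lhs => rw [← List.take_append_drop (PySem.Chars.find s ['\r', '\n']).toNat s]
      rw [← hv]
      rfl
    have hmle := pvTL_min h _ v hs
    have hi : (s.take (PySem.Chars.find s ['\r', '\n']).toNat).length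
        = (PySem.Chars.find s ['\r', '\n']).toNat := by
      rw [List.length_take]
      omega
    omega
  omega

theorem pvTakeLine_none {s : List Char} (h : pvTL s = none) : pvTakeLine s = (s, []) := by
  unfold pvTakeLine
  rw [pvFind_of_none h]
  norm_num

theorem pvTakeLine_some {s p q : List Char} (h : pvTL s = some (p, q)) :
    pvTakeLine s = (p, q) := by
  have hd := pvTL_decomp h
  unfold pvTakeLine
  rw [pvFind_of_some h]
  rw [if_neg (by omega)]
  rw [PySem.List.slice_to s (by omega), PySem.List.slice_from s (by omega)]
  rw [Prod.mk.injEq]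
  refine ⟨?_, ?_⟩
  · rw [show ((p.length : Int)).toNat = p.length from by omega, hd, List.take_left]
  · rw [show ((p.length : Int) + 2).toNat = (p ++ ['\r', '\n']).length from by simp; omega]
    rw [hd, show p ++ '\r' :: '\n' :: q = (p ++ ['\r', '\n']) ++ q from by simp, List.drop_left]

-- ----- the old single-pass-over-lines form, used as the common middle point of the proof -----

def pvAltLoop (rest : List (List Char)) (headers : PySem.Dict String String) :
    PySem.Dict String String × List Char :=
  match rest with
  | [] => (headers, [])
  | line :: rest' =>
      if line = [] then (headers, PySem.Chars.join ['\r', '\n'] rest')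
      else pvAltLoop rest' (pvAddHeader headers line)

def pvOldAlt (raw : String) : String × (List (String × String)) × String :=
  let lines := PySem.Chars.splitOn raw.toList ['\r', '\n']
  let first_line := PySem.Chars.strip ((PySem.List.pyGet? lines 0).getD [])
  let (headers, body) := pvAltLoop (lines.drop 1) ⟨[]⟩
  (String.ofList first_line, headers.items, String.ofList body)

-- B's loop computes exactly pvAltLoop over the CRLF-split lines of the buffer
theorem pvPH_eq_altLoop (n : Nat) :
    ∀ (s : List Char), s.length ≤ n → ∀ d, pvParseHeaders s d = pvAltLoop (pvSp s) d := by
  induction n with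
  | zero =>
    intro s hs d
    have : s = [] := by cases s with | nil => rfl | cons c r => simp at hs
    subst this
    rw [pvParseHeaders]
    simp [pvSp, pvAltLoop, PySem.Chars.join_nil]
  | succ n ih =>
    intro s hs d
    by_cases hnil : s = []
    · subst hnil
      rw [pvParseHeaders]
      simp [pvSp, pvAltLoop, PySem.Chars.join_nil]
    · rw [pvParseHeaders, dif_neg hnil]
      by_cases hpre : PySem.Chars.startswith s ['\r', '\n'] = true
      · rw [if_pos hpre]
        cases s with
        | nil => exact absurd rfl hnil
        | cons c rest =>
          obtain ⟨hc, r, hr⟩ := pvPref2 hpre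
          subst hc; subst hr
          have hsp : pvSp ('\r' :: '\n' :: r) = [] :: pvSp r := by rw [pvSp]
          rw [hsp, pvAltLoop, if_pos rfl, pvJoin_sp]
          rw [PySem.List.slice_from _ (by omega)]
          rfl
      · rw [if_neg hpre]
        cases hTL : pvTL s with
        | none =>
          rw [pvTakeLine_none hTL]
          simp only
          rw [pvParseHeaders]
          rw [pvSp_of_pvTL_none hTL, pvAltLoop, if_neg hnil, pvAltLoop]
          simp
        | some pq =>
          obtain ⟨p, q⟩ := pq
          rw [pvTakeLine_some hTL]
          simp only
          have hd := pvTL_decomp hTL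
          have hq : q.length ≤ n := by
            have : s.length = p.length + 2 + q.length := by rw [hd]; simp; omega
            omega
          rw [ih q hq (pvAddHeader d p)]
          have hpne : p ≠ [] := by
            intro hp
            subst hp
            rw [List.nil_append] at hd
            subst hd
            simp [PySem.Chars.startswith, List.isPrefixOf] at hpre
          rw [pvSp_cons_of_some hTL, pvAltLoop, if_neg hpne]

theorem pvGet0 {α : Type} (x : α) (xs : List α) : PySem.List.pyGet? (x :: xs) 0 = some x := by
  simp [PySem.List.pyGet?, PySem.List.pyIdx?]

theorem pvGet1 {α : Type} (x y : α) (xs : List α) : PySem.List.pyGet? (x :: y :: xs) 1 = some y := by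
  simp [PySem.List.pyGet?, PySem.List.pyIdx?]

-- B equals the common middle point
theorem pvAlt_eq_old (raw : String) : parse_message_alt raw = pvOldAlt raw := by
  simp only [parse_message_alt, pvOldAlt]
  rw [pvSplitOn_eq]
  cases hTL : pvTL raw.toList with
  | none =>
    rw [pvTakeLine_none hTL, pvSp_of_pvTL_none hTL]
    simp only [pvPH_eq_altLoop ([].length) [] (le_refl _) ⟨[]⟩]
    simp [pvSp, pvAltLoop, PySem.Chars.join_nil]
  | some pq =>
    obtain ⟨p, q⟩ := pq
    rw [pvTakeLine_some hTL, pvSp_cons_of_some hTL]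
    simp only [pvPH_eq_altLoop q.length q (le_refl _) ⟨[]⟩]
    simp

-- ----- the old proof: A equals the common middle point -----

theorem pvSp_head {r : List Char} {ps : List (List Char)} (h : pvSp r = [] :: ps) :
    r = [] ∨ ∃ r', r = '\r' :: '\n' :: r' := by
  induction r using pvSp.induct with
  | case1 => exact Or.inl rfl
  | case2 rest ih => exact Or.inr ⟨rest, rfl⟩
  | case3 c rest hc ih =>
    rw [pvSp_eq3 hc] at h
    cases hq : pvSp rest with
    | nil => exact absurd hq (pvSp_ne_nil rest)
    | cons p ps' =>
      rw [hq] at h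
      simp [pvChd] at h

theorem pvSp_tail_empty (l : List Char) (h : [] ∈ (pvSp l).tail) :
    (∃ u v, l = u ++ '\r' :: '\n' :: '\r' :: '\n' :: v) ∨ (∃ u, l = u ++ ['\r', '\n']) := by
  induction l using pvSp.induct with
  | case1 => simp [pvSp] at h
  | case2 rest ih =>
    have h2 : pvSp ('\r' :: '\n' :: rest) = [] :: pvSp rest := by rw [pvSp]
    rw [h2] at h
    simp only [List.tail_cons] at h
    cases hq : pvSp rest with
    | nil => exact absurd hq (pvSp_ne_nil rest)
    | cons p ps =>
      rw [hq] at h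
      rcases List.mem_cons.mp h with h0 | h1
      · rcases pvSp_head (h0 ▸ hq) with hrnil | ⟨r', hr⟩
        · subst hrnil
          exact Or.inr ⟨[], rfl⟩
        · subst hr
          exact Or.inl ⟨[], r', rfl⟩
      · have := ih (by rw [hq]; simpa using h1)
        rcases this with ⟨u, v, hu⟩ | ⟨u, hu⟩
        · exact Or.inl ⟨'\r' :: '\n' :: u, v, by rw [hu]; simp⟩
        · exact Or.inr ⟨'\r' :: '\n' :: u, by rw [hu]; simp⟩
  | case3 c rest hc ih =>
    rw [pvSp_eq3 hc] at h
    cases hq : pvSp rest with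
    | nil => exact absurd hq (pvSp_ne_nil rest)
    | cons p ps =>
      rw [hq] at h
      simp only [pvChd, List.tail_cons] at h
      have := ih (by rw [hq]; simpa using h)
      rcases this with ⟨u, v, hu⟩ | ⟨u, hu⟩
      · exact Or.inl ⟨c :: u, v, by rw [hu]; simp⟩
      · exact Or.inr ⟨c :: u, by rw [hu]; simp⟩

theorem pvBrk_decomp {l p q : List Char} (h : pvBrk l = some (p, q)) :
    l = p ++ '\r' :: '\n' :: '\r' :: '\n' :: q := by
  induction l using pvBrk.induct generalizing p q with
  | case1 rest =>
    rw [pvBrk] at h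
    injection h with h'
    injection h' with h1 h2
    subst h1; subst h2; rfl
  | case2 c rest hc p' q' hb ih =>
    rw [pvBrk_eq2 hc, hb] at h
    injection h with h'
    injection h' with h1 h2
    subst h2
    rw [← h1, List.cons_append]
    rw [ih hb]
  | case3 c rest hc hb ih =>
    rw [pvBrk_eq2 hc, hb] at h
    simp at h
  | case4 => simp [pvBrk] at h

theorem pvBrk_min {l p q : List Char} (h : pvBrk l = some (p, q)) :
    ∀ u v, l = u ++ '\r' :: '\n' :: '\r' :: '\n' :: v → p.length ≤ u.length := by
  induction l using pvBrk.induct generalizing p q with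
  | case1 rest =>
    rw [pvBrk] at h
    injection h with h'
    injection h' with h1 _
    intro u v _
    rw [← h1]
    simp
  | case2 c rest hc p' q' hb ih =>
    rw [pvBrk_eq2 hc, hb] at h
    injection h with h'
    injection h' with h1 h2
    intro u v huv
    cases u with
    | nil =>
      rw [List.nil_append] at huv
      injection huv with e1 e2
      exact (hc v e1 e2).elim
    | cons d u' =>
      rw [List.cons_append] at huv
      injection huv with _ e2
      have := ih hb u' v e2
      rw [← h1]
      simp
      omega
  | case3 c rest hc hb ih =>
    rw [pvBrk_eq2 hc, hb] at h
    simp at h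
  | case4 => simp [pvBrk] at h

theorem pvBrk_none {l : List Char} (h : pvBrk l = none) :
    ∀ u v, l ≠ u ++ '\r' :: '\n' :: '\r' :: '\n' :: v := by
  induction l using pvBrk.induct with
  | case1 rest => rw [pvBrk] at h; simp at h
  | case2 c rest hc p q hb ih => rw [pvBrk_eq2 hc, hb] at h; simp at h
  | case3 c rest hc hb ih =>
    intro u v huv
    cases u with
    | nil =>
      rw [List.nil_append] at huv
      injection huv with e1 e2
      exact hc v e1 e2
    | cons d u' =>
      rw [List.cons_append] at huv
      injection huv with _ e2
      exact ih hb u' v e2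
  | case4 =>
    intro u v huv
    cases u <;> simp at huv

theorem pvBrk_some_tail {l p q : List Char} (h : pvBrk l = some (p, q)) :
    [] ∉ (pvSp p).tail := by
  intro he
  have hd := pvBrk_decomp h
  rcases pvSp_tail_empty p he with ⟨u, v, hu⟩ | ⟨u, hu⟩
  · have hl : l = u ++ '\r' :: '\n' :: '\r' :: '\n' :: (v ++ '\r' :: '\n' :: '\r' :: '\n' :: q) := by
      rw [hd, hu]; simp
    have := pvBrk_min h u _ hl
    have : p.length = u.length + 4 + v.length := by rw [hu]; simp; omega
    omega
  · have hl : l = u ++ '\r' :: '\n' :: '\r' :: '\n' :: ('\r' :: '\n' :: q) := by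
      rw [hd, hu]; simp
    have h1 := pvBrk_min h u _ hl
    have h2 : p.length = u.length + 2 := by rw [hu]; simp
    omega

theorem pvFoldA_append_nil (ys : List (List Char)) (d : PySem.Dict String String) :
    (ys ++ [[]]).foldl pvAddHeader d = ys.foldl pvAddHeader d := by
  rw [List.foldl_append]
  rfl

theorem pvAltLoop_break (ys zs : List (List Char)) (h : [] ∉ ys) (d : PySem.Dict String String) :
    pvAltLoop (ys ++ [] :: zs) d = (ys.foldl pvAddHeader d, PySem.Chars.join ['\r', '\n'] zs) := by
  induction ys generalizing d with
  | nil => simp [pvAltLoop]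
  | cons y ys ih =>
    have hy : y ≠ [] := fun hy => h (hy ▸ List.mem_cons_self)
    rw [List.cons_append, pvAltLoop, if_neg hy]
    rw [ih (fun hm => h (List.mem_cons_of_mem _ hm))]
    rfl

theorem pvAltLoop_no_nil (ys : List (List Char)) (h : [] ∉ ys) (d : PySem.Dict String String) :
    pvAltLoop ys d = (ys.foldl pvAddHeader d, []) := by
  induction ys generalizing d with
  | nil => simp [pvAltLoop]
  | cons y ys ih =>
    have hy : y ≠ [] := fun hy => h (hy ▸ List.mem_cons_self)
    rw [pvAltLoop, if_neg hy]
    rw [ih (fun hm => h (List.mem_cons_of_mem _ hm))]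
    rfl

theorem pvA_eq_old (raw : String) : parse_message raw = pvOldAlt raw := by
  unfold parse_message pvOldAlt
  rw [pvSplitOnMax_eq]
  cases hb : pvBrk raw.toList with
  | some pq =>
    cases pq with
    | mk p q =>
      have hdec : raw.toList = p ++ '\r' :: '\n' :: ('\r' :: '\n' :: q) := pvBrk_decomp hb
      have hlines : pvSp raw.toList = pvSp p ++ [] :: pvSp q := by
        rw [hdec, pvSp_append]
        have h2 : pvSp ('\r' :: '\n' :: q) = [] :: pvSp q := by rw [pvSp]
        rw [h2]
      cases hsp : pvSp p with
      | nil => exact absurd hsp (pvSp_ne_nil p)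
      | cons h0 t =>
        have htail : [] ∉ t := by
          have := pvBrk_some_tail hb
          rw [hsp] at this
          simpa using this
        rw [hsp] at hlines
        simp only [pvGet0, pvGet1, Option.getD_some, pvSplitOn_eq, hlines, hsp,
          List.cons_append, List.drop_one, List.tail_cons]
        rw [pvAltLoop_break t (pvSp q) htail, pvJoin_sp]
        simp
  | none =>
    simp only [pvGet0, Option.getD_some, pvSplitOn_eq]
    by_cases hmem : [] ∈ (pvSp raw.toList).tail
    · rcases pvSp_tail_empty raw.toList hmem with ⟨u, v, hu⟩ | ⟨u, hu⟩
      · exact absurd hu (pvBrk_none hb u v)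
      · have hlines : pvSp raw.toList = pvSp u ++ [[]] := by
          rw [hu, show u ++ ['\r', '\n'] = u ++ '\r' :: '\n' :: ([] : List Char) by rfl, pvSp_append]
          rfl
        have hut : [] ∉ (pvSp u).tail := by
          intro he
          rcases pvSp_tail_empty u he with ⟨u', v', hu'⟩ | ⟨u', hu'⟩
          · exact pvBrk_none hb u' (v' ++ ['\r', '\n']) (by rw [hu, hu']; simp)
          · exact pvBrk_none hb u' [] (by rw [hu, hu']; simp)
        cases hsp : pvSp u with
        | nil => exact absurd hsp (pvSp_ne_nil u)
        | cons h0 t =>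
          rw [hsp] at hlines hut
          have htail : [] ∉ t := by simpa using hut
          simp only [hlines, List.cons_append, List.drop_one, List.tail_cons]
          rw [show (t ++ [[]] : List (List Char)) = t ++ [] :: [] by rfl]
          rw [pvAltLoop_break t [] htail]
          rw [show (t ++ [] :: [] : List (List Char)) = t ++ [[]] by rfl, pvFoldA_append_nil]
          simp [PySem.Chars.join_nil]
    · cases hsp : pvSp raw.toList with
      | nil => exact absurd hsp (pvSp_ne_nil raw.toList)
      | cons h0 t =>
        rw [hsp] at hmem
        simp only [List.tail_cons] at hmem
        simp only [List.drop_one, List.tail_cons]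
        rw [pvAltLoop_no_nil t hmem]
        simp

-- ===== VERDICT (by name: the statement is the Claim_ definition above) =====
theorem parse_message_spec : Claim_equal_parse_message := by
  intro raw _
  unfold Spec_parse_message
  rw [pvAlt_eq_old]
  exact pvA_eq_old raw
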